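-- pv_equiv track=rewrite | github.com/Nikole647/cartoonify.py | cartoonify.py | threshold_helper
-- ===== SOURCE A (Python) =====
-- def out_of_range(image, pixel_x, pixel_y):
--     """checking if the pixel is in range """
--     range_x = len(image)
--     range_y = len(image[0])
--     if pixel_x < 0 or pixel_y < 0 \
--             or pixel_x >= range_x or pixel_y >= range_y:
--         return True
--
-- def threshold_helper(image, i, j, r):
--     """count all the values in the pixels that
--      is in the range"""
--     counter = 0
--     for x in range(i - r, i + r + 1):
--         for y in range(j - r, j + r + 1):
--             temp = out_of_range(image, x, y)  # check if not in range
--             if (temp):  # if not in range than it adds the origin pixel value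
--                 counter += image[i][j]
--             else:  # adds in range values
--                 counter += image[x][y]
--     return counter
-- ===== SOURCE B (Python) =====
-- def threshold_helper(image, i, j, r):
--     """count all the values in the pixels that
--      is in the range"""
--     side = max(0, 2 * r + 1)
--     cnt = side * side
--     if cnt == 0:
--         return 0
--     x_lo = max(i - r, 0)
--     x_hi = max(min(i + r + 1, len(image)), x_lo)
--     y_lo = max(j - r, 0)
--     y_hi = max(min(j + r + 1, len(image[0])), y_lo)
--     in_sum = sum(image[x][y] for x in range(x_lo, x_hi) for y in range(y_lo, y_hi))
--     in_cnt = (x_hi - x_lo) * (y_hi - y_lo)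
--     return in_sum + (cnt - in_cnt) * image[i][j]
-- ===== Notes on version B (the rewrite author's own statement) =====
-- stated objective: alternative
-- what changed: A tests out-of-range per window cell and branches inside a (2r+1)^2 double loop; B clamps the window to the image once, sums only the cells of the clamped rectangle (no per-cell branch), and adds the out-of-range contribution arithmetically as (cnt - in_cnt) * image[i][j].
import Mathlib
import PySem

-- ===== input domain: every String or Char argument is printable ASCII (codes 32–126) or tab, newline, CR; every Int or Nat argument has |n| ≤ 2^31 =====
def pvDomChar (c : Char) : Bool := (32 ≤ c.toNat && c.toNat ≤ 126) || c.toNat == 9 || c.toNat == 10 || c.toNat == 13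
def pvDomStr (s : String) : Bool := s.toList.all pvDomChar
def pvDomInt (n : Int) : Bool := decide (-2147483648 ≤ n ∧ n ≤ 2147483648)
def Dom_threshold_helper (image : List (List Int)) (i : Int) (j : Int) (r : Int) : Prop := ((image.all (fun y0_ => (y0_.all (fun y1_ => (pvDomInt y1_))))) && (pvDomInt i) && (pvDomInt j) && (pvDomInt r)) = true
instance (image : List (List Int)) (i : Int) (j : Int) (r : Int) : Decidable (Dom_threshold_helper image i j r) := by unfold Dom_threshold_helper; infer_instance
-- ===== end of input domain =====

-- B replaces A's per-cell out-of-range branching by one summing pass over the window clamped to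
-- the image plus an arithmetic count of the out-of-range cells (objective: alternative decomposition).

-- ===== PORT A =====
def out_of_range (image : List (List Int)) (pixel_x : Int) (pixel_y : Int) : Bool :=
  let range_x : Int := PySem.List.len image
  let range_y : Int := PySem.List.len (PySem.List.pyGetD image 0 [])
  if pixel_x < 0 ∨ pixel_y < 0 ∨ pixel_x ≥ range_x ∨ pixel_y ≥ range_y then true else false

def threshold_helper (image : List (List Int)) (i : Int) (j : Int) (r : Int) : Int :=
  (PySem.List.pyRange (i - r) (i + r + 1)).foldl (fun counter x =>
    (PySem.List.pyRange (j - r) (j + r + 1)).foldl (fun counter y =>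
      if out_of_range image x y then
        counter + PySem.List.pyGetD (PySem.List.pyGetD image i []) j 0
      else
        counter + PySem.List.pyGetD (PySem.List.pyGetD image x []) y 0) counter) 0

-- ===== PORT B =====
def threshold_helper_alt (image : List (List Int)) (i : Int) (j : Int) (r : Int) : Int :=
  let side : Int := max 0 (2 * r + 1)
  let cnt : Int := side * side
  if cnt = 0 then 0
  else
    let x_lo : Int := max (i - r) 0
    let x_hi : Int := max (min (i + r + 1) (PySem.List.len image)) x_lo
    let y_lo : Int := max (j - r) 0
    let y_hi : Int := max (min (j + r + 1) (PySem.List.len (PySem.List.pyGetD image 0 []))) y_lo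
    let in_sum : Int := ((PySem.List.pyRange x_lo x_hi).map (fun x =>
        ((PySem.List.pyRange y_lo y_hi).map (fun y =>
          PySem.List.pyGetD (PySem.List.pyGetD image x []) y 0)).sum)).sum
    let in_cnt : Int := (x_hi - x_lo) * (y_hi - y_lo)
    in_sum + (cnt - in_cnt) * PySem.List.pyGetD (PySem.List.pyGetD image i []) j 0

-- ===== PRECONDITION & SPEC =====
-- Pre_ is exactly the set of inputs on which the Python A returns normally (no exception): either
-- the window is empty (r < 0), or the image is nonempty, every row met by the clamped window is
-- long enough for the clamped column range (on ragged rows shorter than row 0 both A and B raise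
-- IndexError when the window meets them), and, when the window sticks out of the image (so the
-- center pixel is read), the center index (i, j) is a valid Python index.
def Pre_threshold_helper (image : List (List Int)) (i : Int) (j : Int) (r : Int) : Prop :=
  r < 0 ∨
  (image ≠ [] ∧
    (∀ row ∈ PySem.List.slice image (some (max (i - r) 0))
        (some (max (min (i + r + 1) (PySem.List.len image)) (max (i - r) 0))),
      max (j - r) 0 < max (min (j + r + 1) (PySem.List.len (PySem.List.pyGetD image 0 []))) (max (j - r) 0) →
      max (min (j + r + 1) (PySem.List.len (PySem.List.pyGetD image 0 []))) (max (j - r) 0) ≤ PySem.List.len row) ∧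
    ((i - r < 0 ∨ PySem.List.len image < i + r + 1 ∨ j - r < 0 ∨
        PySem.List.len (PySem.List.pyGetD image 0 []) < j + r + 1) →
      PySem.Raise.InRange (PySem.List.pyGetD image i []).length j))

instance (image : List (List Int)) (i : Int) (j : Int) (r : Int) : Decidable (Pre_threshold_helper image i j r) := by unfold Pre_threshold_helper; infer_instance

def pvWitness_threshold_helper : List (List Int) × Int × Int × Int := ([[1, 2], [3, 4]], 0, 0, 1)

def Spec_threshold_helper (image : List (List Int)) (i : Int) (j : Int) (r : Int) (out : Int) : Prop := out = threshold_helper_alt image i j r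
instance (image : List (List Int)) (i : Int) (j : Int) (r : Int) (out : Int) : Decidable (Spec_threshold_helper image i j r out) := by unfold Spec_threshold_helper; infer_instance

-- ===== CLAIM (what is proved, stated in full; the proofs are below) =====
def Claim_equal_threshold_helper : Prop := ∀ (image : List (List Int)) (i : Int) (j : Int) (r : Int), Dom_threshold_helper image i j r → Pre_threshold_helper image i j r → Spec_threshold_helper image i j r (threshold_helper image i j r)

-- ===== LEMMAS AND PROOFS =====

-- A loop 'for y: if p(y): acc += c else: acc += v(y)' is init + a sum over the range.
lemma pv_foldl_ite_add (l : List Int) (p : Int → Bool) (c : Int) (v : Int → Int) (init : Int) :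
    l.foldl (fun acc y => if p y then acc + c else acc + v y) init
      = init + (l.map (fun y => if p y then c else v y)).sum := by
  have h : (fun (acc : Int) y => if p y then acc + c else acc + v y)
      = (fun (acc : Int) y => acc + if p y then c else v y) := by
    funext acc y; by_cases hp : p y <;> simp [hp]
  rw [h, PySem.List.foldl_add]

lemma pv_out_true (image : List (List Int)) (x y : Int)
    (h : x < 0 ∨ y < 0 ∨ (image.length : Int) ≤ x ∨ (((PySem.List.pyGetD image 0 []).length : Int)) ≤ y) :
    out_of_range image x y = true := by
  simp [out_of_range, PySem.List.len_eq]; omega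

lemma pv_out_false (image : List (List Int)) (x y : Int)
    (h1 : 0 ≤ x) (h2 : 0 ≤ y) (h3 : x < (image.length : Int))
    (h4 : y < ((PySem.List.pyGetD image 0 []).length : Int)) :
    out_of_range image x y = false := by
  simp [out_of_range, PySem.List.len_eq]; omega

-- One dimension: an 'if out-of-range then c else g y' sum over [a, b) equals the sum of g over
-- the clamped sub-range plus (number of out cells) * c.
lemma pv_ite_out (g : Int → Int) (a b w c : Int) (hab : a ≤ b) (hw : 0 ≤ w) :
    ((PySem.List.pyRange a b).map (fun y => if y < 0 ∨ w ≤ y then c else g y)).sum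
      = ((PySem.List.pyRange (max a 0) (max (min b w) (max a 0))).map g).sum
        + (b - a - (max (min b w) (max a 0) - max a 0)) * c := by
  by_cases hcase : max (min b w) (max a 0) ≤ max a 0
  · have hhi : max (min b w) (max a 0) = max a 0 := by omega
    have hout : ∀ y ∈ PySem.List.pyRange a b, (if y < 0 ∨ w ≤ y then c else g y) = c := by
      intro y hy
      rw [PySem.List.mem_pyRange_one] at hy
      rw [if_pos (by omega)]
    rw [List.map_congr_left hout, PySem.List.sum_map_const_int, PySem.List.length_pyRange_one,
      hhi, PySem.List.pyRange_one_eq_nil (le_refl _)]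
    simp only [List.map_nil, List.sum_nil, zero_add]
    have h1 : (((b - a).toNat : Int)) = b - a := by omega
    rw [h1]; ring
  · push_neg at hcase
    have hhi : max (min b w) (max a 0) = min b w := by omega
    rw [hhi] at hcase ⊢
    rw [PySem.List.pyRange_one_append a (max a 0) b (by omega) (by omega),
      PySem.List.pyRange_one_append (max a 0) (min b w) b (by omega) (by omega),
      List.map_append, List.map_append, List.sum_append, List.sum_append]
    have hleft : ∀ y ∈ PySem.List.pyRange a (max a 0), (if y < 0 ∨ w ≤ y then c else g y) = c := by
      intro y hy; rw [PySem.List.mem_pyRange_one] at hy; rw [if_pos (by omega)]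
    have hmid : ∀ y ∈ PySem.List.pyRange (max a 0) (min b w),
        (if y < 0 ∨ w ≤ y then c else g y) = g y := by
      intro y hy; rw [PySem.List.mem_pyRange_one] at hy; rw [if_neg (by omega)]
    have hright : ∀ y ∈ PySem.List.pyRange (min b w) b, (if y < 0 ∨ w ≤ y then c else g y) = c := by
      intro y hy; rw [PySem.List.mem_pyRange_one] at hy; rw [if_pos (by omega)]
    rw [List.map_congr_left hleft, List.map_congr_left hmid, List.map_congr_left hright,
      PySem.List.sum_map_const_int, PySem.List.sum_map_const_int,
      PySem.List.length_pyRange_one, PySem.List.length_pyRange_one]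
    have h1 : (((max a 0 - a).toNat : Int)) = max a 0 - a := by omega
    have h2 : (((b - min b w).toNat : Int)) = b - min b w := by omega
    rw [h1, h2]; ring

theorem threshold_helper_spec : Claim_equal_threshold_helper := by
  intro image i j r _hdom _hpre
  unfold Spec_threshold_helper
  by_cases hr : r < 0
  · have hA : threshold_helper image i j r = 0 := by
      unfold threshold_helper
      rw [PySem.List.pyRange_one_eq_nil (show i + r + 1 ≤ i - r by omega)]
      rfl
    have hB : threshold_helper_alt image i j r = 0 := by
      unfold threshold_helper_alt
      have hside : max 0 (2 * r + 1) = 0 := by omega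
      simp [hside]
    rw [hA, hB]
  · push_neg at hr
    set n : Int := (image.length : Int) with hn_def
    set w : Int := ((PySem.List.pyGetD image 0 []).length : Int) with hw_def
    set cv : Int := PySem.List.pyGetD (PySem.List.pyGetD image i []) j 0 with hcv_def
    set xlo : Int := max (i - r) 0 with hxlo_def
    set xhi : Int := max (min (i + r + 1) n) xlo with hxhi_def
    set ylo : Int := max (j - r) 0 with hylo_def
    set yhi : Int := max (min (j + r + 1) w) ylo with hyhi_def
    have hn0 : 0 ≤ n := by positivity
    have hw0 : 0 ≤ w := by positivity
    -- A as a double sum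
    have hA : threshold_helper image i j r
        = ((PySem.List.pyRange (i - r) (i + r + 1)).map (fun x =>
            ((PySem.List.pyRange (j - r) (j + r + 1)).map (fun y =>
              if out_of_range image x y then cv
              else PySem.List.pyGetD (PySem.List.pyGetD image x []) y 0)).sum)).sum := by
      unfold threshold_helper
      have h1 : (fun (counter : Int) x =>
          (PySem.List.pyRange (j - r) (j + r + 1)).foldl (fun counter y =>
            if out_of_range image x y then counter + cv
            else counter + PySem.List.pyGetD (PySem.List.pyGetD image x []) y 0) counter)
          = (fun (counter : Int) x => counter +
              ((PySem.List.pyRange (j - r) (j + r + 1)).map (fun y =>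
                if out_of_range image x y then cv
                else PySem.List.pyGetD (PySem.List.pyGetD image x []) y 0)).sum) := by
        funext counter x
        exact pv_foldl_ite_add _ _ _ _ _
      rw [h1, PySem.List.foldl_add, zero_add]
    -- per-row reduction of the inner sum
    have hx_congr : ∀ x ∈ PySem.List.pyRange (i - r) (i + r + 1),
        ((PySem.List.pyRange (j - r) (j + r + 1)).map (fun y =>
            if out_of_range image x y then cv
            else PySem.List.pyGetD (PySem.List.pyGetD image x []) y 0)).sum
        = (fun x => if x < 0 ∨ n ≤ x then ((j + r + 1) - (j - r)) * cv
            else (((PySem.List.pyRange ylo yhi).map (fun y =>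
                PySem.List.pyGetD (PySem.List.pyGetD image x []) y 0)).sum
              + (((j + r + 1) - (j - r)) - (yhi - ylo)) * cv)) x := by
      intro x hx
      rw [PySem.List.mem_pyRange_one] at hx
      beta_reduce
      by_cases hxout : x < 0 ∨ n ≤ x
      · rw [if_pos hxout]
        have hconst : ∀ y ∈ PySem.List.pyRange (j - r) (j + r + 1),
            (if out_of_range image x y then cv
              else PySem.List.pyGetD (PySem.List.pyGetD image x []) y 0) = cv := by
          intro y hy
          rw [if_pos (pv_out_true image x y (by omega))]
        rw [List.map_congr_left hconst, PySem.List.sum_map_const_int,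
          PySem.List.length_pyRange_one]
        have hcast : ((((j + r + 1) - (j - r)).toNat : Int)) = (j + r + 1) - (j - r) := by omega
        rw [hcast]
      · rw [if_neg hxout]
        push_neg at hxout
        have hcong2 : ∀ y ∈ PySem.List.pyRange (j - r) (j + r + 1),
            (if out_of_range image x y then cv
              else PySem.List.pyGetD (PySem.List.pyGetD image x []) y 0)
            = (if y < 0 ∨ w ≤ y then cv
              else PySem.List.pyGetD (PySem.List.pyGetD image x []) y 0) := by
          intro y hy
          by_cases hy2 : y < 0 ∨ w ≤ y
          · rw [if_pos hy2, if_pos (pv_out_true image x y (by omega))]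
          · push_neg at hy2
            have ho : out_of_range image x y = false :=
              pv_out_false image x y (by omega) (by omega) (by omega) (by omega)
            rw [ho]
            simp only [Bool.false_eq_true, if_false]
            rw [if_neg (show ¬ (y < 0 ∨ w ≤ y) by omega)]
        rw [List.map_congr_left hcong2,
          pv_ite_out (fun y => PySem.List.pyGetD (PySem.List.pyGetD image x []) y 0)
            (j - r) (j + r + 1) w cv (by omega) hw0]
    rw [hA, List.map_congr_left hx_congr,
      pv_ite_out _ (i - r) (i + r + 1) n (((j + r + 1) - (j - r)) * cv) (by omega) hn0]
    have hsum_add : ((PySem.List.pyRange xlo xhi).map (fun x =>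
        ((PySem.List.pyRange ylo yhi).map (fun y =>
            PySem.List.pyGetD (PySem.List.pyGetD image x []) y 0)).sum
          + (((j + r + 1) - (j - r)) - (yhi - ylo)) * cv)).sum
        = ((PySem.List.pyRange xlo xhi).map (fun x =>
            ((PySem.List.pyRange ylo yhi).map (fun y =>
              PySem.List.pyGetD (PySem.List.pyGetD image x []) y 0)).sum)).sum
          + ((xhi - xlo) * ((((j + r + 1) - (j - r)) - (yhi - ylo)) * cv)) := by
      rw [PySem.List.sum_map_add_int]
      congr 1
      rw [PySem.List.sum_map_const_int, PySem.List.length_pyRange_one]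
      have : (((xhi - xlo).toNat : Int)) = xhi - xlo := by omega
      rw [this]
    -- B
    have hB : threshold_helper_alt image i j r
        = ((PySem.List.pyRange xlo xhi).map (fun x =>
            ((PySem.List.pyRange ylo yhi).map (fun y =>
              PySem.List.pyGetD (PySem.List.pyGetD image x []) y 0)).sum)).sum
          + ((2 * r + 1) * (2 * r + 1) - (xhi - xlo) * (yhi - ylo)) * cv := by
      unfold threshold_helper_alt
      have hside : max 0 (2 * r + 1) = 2 * r + 1 := by omega
      have hcnt : ¬ ((2 * r + 1) * (2 * r + 1) = 0) := by
        intro h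
        rcases mul_eq_zero.mp h with h | h <;> omega
      simp only [hside, PySem.List.len_eq, if_neg hcnt, ← hn_def, ← hw_def, ← hxlo_def,
        ← hxhi_def, ← hylo_def, ← hyhi_def, ← hcv_def]
    rw [hsum_add, hB]
    ring
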